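-- pv_equiv track=rewrite | github.com/Aathira-S/RSA-Demonstration | encryptdecrypt.py | breakblock
-- ===== SOURCE A (Python) =====
-- def breakblock(lis,n):
--     '''converts each element of list lis
--         into the corresponding substring it represents
--         using ascii value and concatenates the whole
--         to reproduce the full message string msg
--     '''
--
--     msg=''   #msg==> to store final message
--
--     for i in lis:
--         m=''
--         while i>0:
--             m=chr(i%1000)+m         #takes every 3 digits of block which represents a character of message
--             i=i//1000
--         msg+=m              #adds the substring onto final message
--
--     return msg
-- ===== SOURCE B (Python) =====
-- def breakblock(lis, n):
--     '''Same decoding, built front-to-back: find the highest base-1000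
--     power of each positive block, then emit its characters most-significant
--     first into one flat buffer joined at the end.'''
--     out = []
--     for i in lis:
--         if i > 0:
--             p = 1
--             while p * 1000 <= i:
--                 p *= 1000
--             while p >= 1:
--                 out.append(chr(i // p % 1000))
--                 p //= 1000
--     return ''.join(out)
-- ===== Notes on version B (the rewrite author's own statement) =====
-- stated objective: alternative
-- what changed: Instead of extracting characters least-significant first and prepending each onto a per-block string, B first finds the highest base-1000 power of each positive block and then emits its characters most-significant first by i//p%1000 into one flat list joined once at the end.
import Mathlib
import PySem

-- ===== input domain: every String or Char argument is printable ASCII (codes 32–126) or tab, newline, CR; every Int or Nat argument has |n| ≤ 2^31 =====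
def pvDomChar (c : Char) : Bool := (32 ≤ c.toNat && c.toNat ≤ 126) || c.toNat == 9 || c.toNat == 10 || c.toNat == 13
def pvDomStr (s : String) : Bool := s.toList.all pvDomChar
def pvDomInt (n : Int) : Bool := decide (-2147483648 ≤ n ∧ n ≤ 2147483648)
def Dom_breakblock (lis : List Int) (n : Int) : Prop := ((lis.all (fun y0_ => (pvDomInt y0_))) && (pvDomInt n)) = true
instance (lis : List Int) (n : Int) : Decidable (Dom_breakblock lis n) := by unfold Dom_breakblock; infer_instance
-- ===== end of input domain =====

-- B rebuilds each block's characters front-to-back from its highest base-1000 power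
-- into one flat buffer joined at the end (objective: alternative decomposition, same cost).

-- chr(c) for 0 ≤ c < 0xD800 (every code here is in [0, 1000)): exact
def pyChr (c : Int) : Char := Char.ofNat c.toNat

-- ===== PORT A =====
-- the inner 'while i>0: m = chr(i%1000)+m; i = i//1000' with accumulator m
def breakA_inner (i : Int) (m : List Char) : List Char :=
  if h : 0 < i then
    breakA_inner (PySem.Int.floordiv i 1000) (pyChr (PySem.Int.mod i 1000) :: m)
  else m
termination_by i.toNat
decreasing_by
  rw [PySem.Int.floordiv_eq_ediv_of_pos (by norm_num : (0:Int) < 1000)]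
  omega

def breakblock (lis : List Int) (n : Int) : String :=
  String.ofList (lis.foldl (fun msg i => msg ++ breakA_inner i []) [])

-- ===== PORT B =====
-- 'p = 1; while p*1000 <= i: p *= 1000'  (the '1 ≤ p' conjunct only makes the
-- same computation total; at the call site p starts at 1 and only grows)
def growPow (i : Int) (p : Int) : Int :=
  if h : 1 ≤ p ∧ p * 1000 ≤ i then growPow i (p * 1000) else p
termination_by (i - p).toNat
decreasing_by omega

-- 'while p >= 1: out.append(chr(i // p % 1000)); p //= 1000'
def emitB (i : Int) (p : Int) : List Char :=
  if h : 1 ≤ p then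
    pyChr (PySem.Int.mod (PySem.Int.floordiv i p) 1000) :: emitB i (PySem.Int.floordiv p 1000)
  else []
termination_by p.toNat
decreasing_by
  rw [PySem.Int.floordiv_eq_ediv_of_pos (by norm_num : (0:Int) < 1000)]
  omega

def breakblock_alt (lis : List Int) (n : Int) : String :=
  String.ofList (lis.foldl
    (fun out i => out ++ (if 0 < i then emitB i (growPow i 1) else [])) [])

-- ===== PRECONDITION & SPEC =====
def Spec_breakblock (lis : List Int) (n : Int) (out : String) : Prop := out = breakblock_alt lis n
instance (lis : List Int) (n : Int) (out : String) : Decidable (Spec_breakblock lis n out) := by unfold Spec_breakblock; infer_instance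

-- ===== CLAIM (what is proved, stated in full; the proofs are below) =====
def Claim_equal_breakblock : Prop := ∀ (lis : List Int) (n : Int), Dom_breakblock lis n → Spec_breakblock lis n (breakblock lis n)

-- ===== LEMMAS AND PROOFS =====

theorem floordiv_1000_eq (i : Int) : PySem.Int.floordiv i 1000 = i / 1000 :=
  PySem.Int.floordiv_eq_ediv_of_pos (by norm_num)

theorem floordiv_one (i : Int) : PySem.Int.floordiv i 1 = i := by
  rw [PySem.Int.floordiv_eq_ediv_of_pos (by norm_num : (0:Int) < 1)]; exact Int.ediv_one i

-- A's inner loop pulls its accumulator out front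
theorem le_div1000 (q i : Int) : q ≤ i / 1000 ↔ q * 1000 ≤ i :=
  Int.le_ediv_iff_mul_le (by norm_num)

theorem breakA_inner_acc : ∀ (N : Nat) (i : Int), i.toNat ≤ N → ∀ m : List Char,
    breakA_inner i m = breakA_inner i [] ++ m := by
  intro N
  induction N with
  | zero =>
    intro i hN m
    rw [breakA_inner, dif_neg (by omega : ¬ 0 < i), breakA_inner, dif_neg (by omega : ¬ 0 < i)]
    simp
  | succ N ih =>
    intro i hi m
    by_cases h : 0 < i
    · have hd : (PySem.Int.floordiv i 1000).toNat ≤ N := by rw [floordiv_1000_eq]; omega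
      rw [breakA_inner, dif_pos h]
      conv_rhs => rw [breakA_inner, dif_pos h]
      rw [ih _ hd, ih _ hd [pyChr (PySem.Int.mod i 1000)]]
      simp
    · rw [breakA_inner, dif_neg h, breakA_inner, dif_neg h]; simp

-- growing the power from 1000·p over i is growing it from p over i//1000, times 1000
theorem grow_scale : ∀ (N : Nat) (i p : Int), (i / 1000 - p).toNat ≤ N → 1 ≤ p →
    growPow i (1000 * p) = 1000 * growPow (PySem.Int.floordiv i 1000) p := by
  intro N
  induction N with
  | zero =>
    intro i p hN hp
    have hcond : ¬ (p * 1000 ≤ i / 1000) := by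
      intro hc; omega
    have hc' : ¬ ((1000 * p) * 1000 ≤ i) := by
      intro hle
      exact hcond ((le_div1000 (p * 1000) i).2 (by omega))
    rw [growPow, dif_neg (fun hcc => hc' hcc.2), growPow,
      dif_neg (fun hcc => hcond (by rw [floordiv_1000_eq] at hcc; exact hcc.2))]
  | succ N ih =>
    intro i p hN hp
    by_cases hc : p * 1000 ≤ i / 1000
    · have hc' : (1000 * p) * 1000 ≤ i := by
        have := (le_div1000 (p * 1000) i).1 hc
        omega
      rw [growPow, dif_pos ⟨by omega, hc'⟩]
      conv_rhs => rw [growPow, dif_pos ⟨hp, by rw [floordiv_1000_eq]; exact hc⟩]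
      have hN' : (i / 1000 - p * 1000).toNat ≤ N := by omega
      have := ih i (p * 1000) hN' (by omega)
      rw [show (1000 * p) * 1000 = 1000 * (p * 1000) by ring]
      exact this
    · have hc' : ¬ ((1000 * p) * 1000 ≤ i) := by
        intro hle
        exact hc ((le_div1000 (p * 1000) i).2 (by omega))
      rw [growPow, dif_neg (fun hcc => hc' hcc.2), growPow,
        dif_neg (fun hcc => hc (by rw [floordiv_1000_eq] at hcc; exact hcc.2))]

-- emitting over power 1000^(k+1) peels off the least-significant character
theorem emit_step : ∀ (k : Nat) (i : Int),
    emitB i (1000 ^ (k + 1)) = emitB (PySem.Int.floordiv i 1000) (1000 ^ k)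
      ++ [pyChr (PySem.Int.mod i 1000)] := by
  intro k
  induction k with
  | zero =>
    intro i
    rw [pow_one, pow_zero]
    rw [emitB, dif_pos (by norm_num : (1:Int) ≤ 1000)]
    have h1 : PySem.Int.floordiv (1000:Int) 1000 = 1 := by decide
    rw [h1, emitB, dif_pos le_rfl, floordiv_one]
    have h2 : PySem.Int.floordiv (1:Int) 1000 = 0 := by decide
    rw [h2, emitB, dif_neg (by norm_num : ¬ (1:Int) ≤ 0)]
    conv_rhs => rw [emitB, dif_pos le_rfl, floordiv_one]
    rw [h2, emitB, dif_neg (by norm_num : ¬ (1:Int) ≤ 0)]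
    simp
  | succ k ih =>
    intro i
    have hpow : (0:Int) < 1000 ^ (k + 1) := by positivity
    rw [emitB, dif_pos (one_le_pow₀ (by norm_num : (1:Int) ≤ 1000))]
    have hdiv : PySem.Int.floordiv ((1000:Int) ^ (k + 1 + 1)) 1000 = 1000 ^ (k + 1) := by
      rw [floordiv_1000_eq, pow_succ, Int.mul_ediv_cancel _ (by norm_num)]
    rw [hdiv, ih i]
    conv_rhs => rw [emitB, dif_pos (one_le_pow₀ (by norm_num : (1:Int) ≤ 1000))]
    have hdiv2 : PySem.Int.floordiv ((1000:Int) ^ (k + 1)) 1000 = 1000 ^ k := by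
      rw [floordiv_1000_eq, pow_succ, Int.mul_ediv_cancel _ (by norm_num)]
    rw [hdiv2]
    have hcomp : PySem.Int.floordiv (PySem.Int.floordiv i 1000) (1000 ^ (k + 1))
        = PySem.Int.floordiv i (1000 ^ (k + 1 + 1)) := by
      rw [floordiv_1000_eq, PySem.Int.floordiv_eq_ediv_of_pos hpow,
        PySem.Int.floordiv_eq_ediv_of_pos (by positivity),
        Int.ediv_ediv_of_nonneg (by norm_num), ← pow_succ']
    rw [hcomp]
    simp

-- per positive block: B's power search + front-to-back emission = A's inner loop
theorem main_lemma : ∀ (N : Nat) (i : Int), i.toNat ≤ N → 0 < i →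
    (∃ k : Nat, growPow i 1 = 1000 ^ k) ∧ emitB i (growPow i 1) = breakA_inner i [] := by
  intro N
  induction N with
  | zero => intro i hN hi; omega
  | succ N ih =>
    intro i hN hi
    by_cases hbig : 1000 ≤ i
    · -- recursive case
      set j := PySem.Int.floordiv i 1000 with hj
      have hj' : j = i / 1000 := by rw [hj, floordiv_1000_eq]
      have hjpos : 0 < j := by rw [hj']; omega
      have hjN : j.toNat ≤ N := by rw [hj']; omega
      obtain ⟨⟨k, hk⟩, hemit⟩ := ih j hjN hjpos
      have hg : growPow i 1 = 1000 ^ (k + 1) := by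
        rw [growPow, dif_pos ⟨le_rfl, by omega⟩]
        have hs := grow_scale ((i / 1000 - 1).toNat) i 1 le_rfl le_rfl
        rw [show (1:Int) * 1000 = 1000 * 1 by ring, hs, ← hj, hk, pow_succ']
      refine ⟨⟨k + 1, hg⟩, ?_⟩
      rw [hg, emit_step k i, ← hj, ← hk, hemit]
      conv_rhs => rw [breakA_inner, dif_pos hi]
      rw [← hj, breakA_inner_acc j.toNat j le_rfl [pyChr (PySem.Int.mod i 1000)]]
    · -- 0 < i < 1000: single character
      have hg : growPow i 1 = 1 := by
        rw [growPow, dif_neg]; rintro ⟨-, hc⟩; omega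
      refine ⟨⟨0, by rw [hg, pow_zero]⟩, ?_⟩
      rw [hg, emitB, dif_pos le_rfl, floordiv_one]
      have h2 : PySem.Int.floordiv (1:Int) 1000 = 0 := by decide
      rw [h2, emitB, dif_neg (by norm_num : ¬ (1:Int) ≤ 0)]
      rw [breakA_inner, dif_pos hi]
      have hz : PySem.Int.floordiv i 1000 = 0 := by rw [floordiv_1000_eq]; omega
      rw [hz, breakA_inner, dif_neg (by norm_num : ¬ (0:Int) < 0)]

-- ===== VERDICT (by name: the statement is the Claim_ definition above) =====
theorem breakblock_spec : Claim_equal_breakblock := by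
  intro lis n _
  unfold Spec_breakblock breakblock breakblock_alt
  have hfun : (fun (msg : List Char) (i : Int) => msg ++ breakA_inner i [])
      = (fun out i => out ++ (if 0 < i then emitB i (growPow i 1) else [])) := by
    funext msg i
    by_cases hi : 0 < i
    · rw [if_pos hi, (main_lemma i.toNat i le_rfl hi).2]
    · rw [if_neg hi, breakA_inner, dif_neg hi]
  rw [hfun]
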